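-- pv_equiv track=rewrite | github.com/dashrgame/dashr | src/utils/autotile.py | compute_autotile_variations
-- ===== SOURCE A (Python) =====
-- def compute_autotile_variations(shape, color="green"):
--     variations = []
--     if isinstance(shape, list) and all(isinstance(pos, tuple) for pos in shape):
--         for pos in shape:
--             tile_data = get_tile_variation(pos, shape, color)
--             variations.append((pos, tile_data["tile_id"]))
--     else:
--         raise ValueError("Shape must be a list of positions (tuples).")
--     return variations
--
-- def get_tile_variation(pos, shape, color="green"):
--     x, y = pos
--     max_y = len(shape)
--     max_x = len(shape[0]) if max_y > 0 else 0
--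
--     def filled(nx, ny):
--         return 0 <= ny < max_y and 0 <= nx < max_x and bool(shape[ny][nx])
--
--     sides = {
--         "up": filled(x, y - 1),
--         "down": filled(x, y + 1),
--         "left": filled(x - 1, y),
--         "right": filled(x + 1, y),
--     }
--     filled_count = sum(sides.values())
--
--     # Determine the tile type string
--     if filled_count == 4:
--         type_str = "full"
--     elif filled_count == 3:
--         empty_side = [k for k, v in sides.items() if not v][0]
--         if empty_side == "up":
--             type_str = "bottom_left_right"
--         elif empty_side == "down":
--             type_str = "top_left_right"
--         elif empty_side == "left":
--             type_str = "top_right_bottom"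
--         elif empty_side == "right":
--             type_str = "top_left_bottom"
--         else:
--             type_str = "center"
--     elif filled_count == 2:
--         filled_sides = [k for k, v in sides.items() if v]
--         if set(filled_sides) == {"up", "down"}:
--             type_str = "top_bottom"
--         elif set(filled_sides) == {"left", "right"}:
--             type_str = "left_right"
--         elif set(filled_sides) == {"up", "left"}:
--             type_str = "top_left"
--         elif set(filled_sides) == {"up", "right"}:
--             type_str = "top_right"
--         elif set(filled_sides) == {"down", "left"}:
--             type_str = "bottom_left"
--         elif set(filled_sides) == {"down", "right"}:
--             type_str = "bottom_right"
--         else: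
--             type_str = "center"
--     elif filled_count == 1:
--         filled_side = [k for k, v in sides.items() if v][0]
--         if filled_side == "up":
--             type_str = "top"
--         elif filled_side == "down":
--             type_str = "bottom"
--         elif filled_side == "left":
--             type_str = "left"
--         elif filled_side == "right":
--             type_str = "right"
--         else:
--             type_str = "center"
--     else:
--         type_str = "center"
--
--     # Compute the tile id using color and type_str
--     tile_id = f"tile_{color}_{type_str}"
--
--     return {
--         "tile_id": tile_id,
--         "type_str": type_str,
--         "sides": sides,
--     }
-- ===== SOURCE B (Python) =====
-- # B: same neighbor booleans, but type_str comes from one precomputed 16-entry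
-- # bitmask table instead of A's counting-plus-branch cascade.
--
-- _TYPES = [
--     "center", "top", "bottom", "top_bottom",
--     "left", "top_left", "bottom_left", "top_left_bottom",
--     "right", "top_right", "bottom_right", "top_right_bottom",
--     "left_right", "top_left_right", "bottom_left_right", "full",
-- ]
--
--
-- def compute_autotile_variations(shape, color="green"):
--     if not (isinstance(shape, list) and all(isinstance(pos, tuple) for pos in shape)):
--         raise ValueError("Shape must be a list of positions (tuples).")
--     max_y = len(shape)
--     max_x = len(shape[0]) if max_y > 0 else 0
--
--     def filled(nx, ny):
--         return 0 <= ny < max_y and 0 <= nx < max_x and bool(shape[ny][nx])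
--
--     out = []
--     for x, y in shape:
--         mask = (filled(x, y - 1)
--                 | filled(x, y + 1) << 1
--                 | filled(x - 1, y) << 2
--                 | filled(x + 1, y) << 3)
--         out.append(((x, y), f"tile_{color}_{_TYPES[mask]}"))
--     return out
-- ===== Notes on version B (the rewrite author's own statement) =====
-- stated objective: idiomatic
-- what changed: Replaces A's count-the-filled-sides plus three cascading branch chains (with list-comprehension extraction of the empty/filled side names and set comparisons) by a single precomputed 16-entry bitmask table indexed by the four neighbor booleans.
import Mathlib
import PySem

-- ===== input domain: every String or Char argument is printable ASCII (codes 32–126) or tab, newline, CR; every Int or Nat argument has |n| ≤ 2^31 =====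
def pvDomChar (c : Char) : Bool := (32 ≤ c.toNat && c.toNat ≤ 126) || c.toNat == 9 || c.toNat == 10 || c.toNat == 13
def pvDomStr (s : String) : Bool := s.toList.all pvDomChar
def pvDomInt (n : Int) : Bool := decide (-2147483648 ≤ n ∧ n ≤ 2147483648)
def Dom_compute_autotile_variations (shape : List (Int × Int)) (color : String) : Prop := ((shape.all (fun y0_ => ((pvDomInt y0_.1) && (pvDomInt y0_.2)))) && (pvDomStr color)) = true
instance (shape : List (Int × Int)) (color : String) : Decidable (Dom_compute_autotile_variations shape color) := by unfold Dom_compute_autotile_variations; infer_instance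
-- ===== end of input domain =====

-- B replaces A's filled-side counting and three cascading branch chains by a single
-- precomputed 16-entry bitmask table over the four neighbor booleans (idiomatic; same cost).


-- ===== PORT A =====
-- filled(nx, ny): shape[ny] is a pair, so len(shape[0]) = 2 and shape[ny][nx] is the
-- first/second component for nx = 0/1 (the bounds guard makes the index exact).
def pvFilledA (shape : List (Int × Int)) (nx ny : Int) : Bool :=
  let max_y : Int := shape.length
  let max_x : Int := if 0 < max_y then 2 else 0
  decide (0 ≤ ny) && decide (ny < max_y) && decide (0 ≤ nx) && decide (nx < max_x) &&
    (match PySem.List.pyGet? shape ny with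
     | some p => (if nx == 0 then p.1 else p.2) != 0
     | none => false)

-- get_tile_variation: the caller uses only the "tile_id" field of the returned dict
-- (which is heterogeneous), so the port returns that string.
def pvGetTileVariationA (pos : Int × Int) (shape : List (Int × Int)) (color : String) : String :=
  let x := pos.1
  let y := pos.2
  let sides : List (String × Bool) :=
    [("up", pvFilledA shape x (y - 1)), ("down", pvFilledA shape x (y + 1)),
     ("left", pvFilledA shape (x - 1) y), ("right", pvFilledA shape (x + 1) y)]
  let filled_count := (sides.filter (fun kv => kv.2)).length
  let type_str :=
    if filled_count == 4 then "full"
    else if filled_count == 3 then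
      let empty_side := (((sides.filter (fun kv => !kv.2)).map Prod.fst).headD "")
      if empty_side == "up" then "bottom_left_right"
      else if empty_side == "down" then "top_left_right"
      else if empty_side == "left" then "top_right_bottom"
      else if empty_side == "right" then "top_left_bottom"
      else "center"
    else if filled_count == 2 then
      let filled_sides := (sides.filter (fun kv => kv.2)).map Prod.fst
      if PySem.Set.equal (PySem.Set.ofList filled_sides) (PySem.Set.ofList ["up", "down"]) then "top_bottom"
      else if PySem.Set.equal (PySem.Set.ofList filled_sides) (PySem.Set.ofList ["left", "right"]) then "left_right"
      else if PySem.Set.equal (PySem.Set.ofList filled_sides) (PySem.Set.ofList ["up", "left"]) then "top_left"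
      else if PySem.Set.equal (PySem.Set.ofList filled_sides) (PySem.Set.ofList ["up", "right"]) then "top_right"
      else if PySem.Set.equal (PySem.Set.ofList filled_sides) (PySem.Set.ofList ["down", "left"]) then "bottom_left"
      else if PySem.Set.equal (PySem.Set.ofList filled_sides) (PySem.Set.ofList ["down", "right"]) then "bottom_right"
      else "center"
    else if filled_count == 1 then
      let filled_side := (((sides.filter (fun kv => kv.2)).map Prod.fst).headD "")
      if filled_side == "up" then "top"
      else if filled_side == "down" then "bottom"
      else if filled_side == "left" then "left"
      else if filled_side == "right" then "right"
      else "center"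
    else "center"
  "tile_" ++ color ++ "_" ++ type_str

-- the isinstance guard is always true under the type convention, so the ValueError branch is unreachable
def compute_autotile_variations (shape : List (Int × Int)) (color : String) : List ((Int × Int) × String) :=
  shape.foldl (fun variations pos => variations ++ [(pos, pvGetTileVariationA pos shape color)]) []

-- ===== PORT B =====
def pvTypes : List String :=
  ["center", "top", "bottom", "top_bottom",
   "left", "top_left", "bottom_left", "top_left_bottom",
   "right", "top_right", "bottom_right", "top_right_bottom",
   "left_right", "top_left_right", "bottom_left_right", "full"]

def pvFilledB (shape : List (Int × Int)) (nx ny : Int) : Bool :=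
  let max_y : Int := shape.length
  let max_x : Int := if 0 < max_y then 2 else 0
  decide (0 ≤ ny) && decide (ny < max_y) && decide (0 ≤ nx) && decide (nx < max_x) &&
    (match PySem.List.pyGet? shape ny with
     | some p => (if nx == 0 then p.1 else p.2) != 0
     | none => false)

-- _TYPES[mask]: mask is always in 0..15 and pvTypes has 16 entries, so the default is never taken
def compute_autotile_variations_alt (shape : List (Int × Int)) (color : String) : List ((Int × Int) × String) :=
  shape.foldl (fun out p =>
    let mask : Nat :=
      (if pvFilledB shape p.1 (p.2 - 1) then 1 else 0) |||
      ((if pvFilledB shape p.1 (p.2 + 1) then 1 else 0) <<< 1) |||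
      ((if pvFilledB shape (p.1 - 1) p.2 then 1 else 0) <<< 2) |||
      ((if pvFilledB shape (p.1 + 1) p.2 then 1 else 0) <<< 3)
    out ++ [((p.1, p.2), "tile_" ++ color ++ "_" ++ pvTypes.getD mask "")]) []

-- ===== PRECONDITION & SPEC =====
def Spec_compute_autotile_variations (shape : List (Int × Int)) (color : String) (out : List ((Int × Int) × String)) : Prop := out = compute_autotile_variations_alt shape color
instance (shape : List (Int × Int)) (color : String) (out : List ((Int × Int) × String)) : Decidable (Spec_compute_autotile_variations shape color out) := by unfold Spec_compute_autotile_variations; infer_instance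

-- ===== CLAIM (what is proved, stated in full; the proofs are below) =====
def Claim_equal_compute_autotile_variations : Prop := ∀ (shape : List (Int × Int)) (color : String), Dom_compute_autotile_variations shape color → Spec_compute_autotile_variations shape color (compute_autotile_variations shape color)

-- ===== LEMMAS AND PROOFS =====
theorem pvFilledB_eq_A (shape : List (Int × Int)) (nx ny : Int) :
    pvFilledB shape nx ny = pvFilledA shape nx ny := rfl

theorem pv_foldl_append_eq_map {α β : Type} (f : α → β) (xs : List α) (acc : List β) :
    xs.foldl (fun a x => a ++ [f x]) acc = acc ++ xs.map f := by
  induction xs generalizing acc with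
  | nil => simp
  | cons x xs ih => simp [List.foldl, ih]

-- A's branch cascade agrees with B's 16-entry table for every combination of the four booleans
theorem pv_type_table (u d l r : Bool) (color : String) :
    (let sides : List (String × Bool) := [("up", u), ("down", d), ("left", l), ("right", r)]
     let filled_count := (sides.filter (fun kv => kv.2)).length
     let type_str :=
       if filled_count == 4 then "full"
       else if filled_count == 3 then
         let empty_side := (((sides.filter (fun kv => !kv.2)).map Prod.fst).headD "")
         if empty_side == "up" then "bottom_left_right"
         else if empty_side == "down" then "top_left_right"
         else if empty_side == "left" then "top_right_bottom"
         else if empty_side == "right" then "top_left_bottom"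
         else "center"
       else if filled_count == 2 then
         let filled_sides := (sides.filter (fun kv => kv.2)).map Prod.fst
         if PySem.Set.equal (PySem.Set.ofList filled_sides) (PySem.Set.ofList ["up", "down"]) then "top_bottom"
         else if PySem.Set.equal (PySem.Set.ofList filled_sides) (PySem.Set.ofList ["left", "right"]) then "left_right"
         else if PySem.Set.equal (PySem.Set.ofList filled_sides) (PySem.Set.ofList ["up", "left"]) then "top_left"
         else if PySem.Set.equal (PySem.Set.ofList filled_sides) (PySem.Set.ofList ["up", "right"]) then "top_right"
         else if PySem.Set.equal (PySem.Set.ofList filled_sides) (PySem.Set.ofList ["down", "left"]) then "bottom_left"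
         else if PySem.Set.equal (PySem.Set.ofList filled_sides) (PySem.Set.ofList ["down", "right"]) then "bottom_right"
         else "center"
       else if filled_count == 1 then
         let filled_side := (((sides.filter (fun kv => kv.2)).map Prod.fst).headD "")
         if filled_side == "up" then "top"
         else if filled_side == "down" then "bottom"
         else if filled_side == "left" then "left"
         else if filled_side == "right" then "right"
         else "center"
       else "center"
     "tile_" ++ color ++ "_" ++ type_str) =
    "tile_" ++ color ++ "_" ++
      pvTypes.getD ((if u then 1 else 0) ||| ((if d then 1 else 0) <<< 1) |||
                    ((if l then 1 else 0) <<< 2) ||| ((if r then 1 else 0) <<< 3)) "" := by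
  cases u <;> cases d <;> cases l <;> cases r <;> rfl

theorem pv_elem_eq (shape : List (Int × Int)) (color : String) (p : Int × Int) :
    (p, pvGetTileVariationA p shape color) =
    (let mask : Nat :=
      (if pvFilledB shape p.1 (p.2 - 1) then 1 else 0) |||
      ((if pvFilledB shape p.1 (p.2 + 1) then 1 else 0) <<< 1) |||
      ((if pvFilledB shape (p.1 - 1) p.2 then 1 else 0) <<< 2) |||
      ((if pvFilledB shape (p.1 + 1) p.2 then 1 else 0) <<< 3)
     ((p.1, p.2), "tile_" ++ color ++ "_" ++ pvTypes.getD mask "")) := by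
  obtain ⟨x, y⟩ := p
  simp only [pvFilledB_eq_A]
  exact congrArg ((x, y), ·) (pv_type_table (pvFilledA shape x (y - 1)) (pvFilledA shape x (y + 1))
    (pvFilledA shape (x - 1) y) (pvFilledA shape (x + 1) y) color)

-- ===== VERDICT (by name: the statement is the Claim_ definition above) =====
theorem compute_autotile_variations_spec : Claim_equal_compute_autotile_variations := by
  intro shape color _
  unfold Spec_compute_autotile_variations compute_autotile_variations compute_autotile_variations_alt
  rw [pv_foldl_append_eq_map (fun pos => (pos, pvGetTileVariationA pos shape color)),
      pv_foldl_append_eq_map]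
  simp only [List.nil_append]
  exact List.map_congr_left (fun p _ => pv_elem_eq shape color p)
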